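-- pv_equiv track=rewrite | github.com/caiofelipe1/Computational-Thinking-With-Python | mainpy/main.py | matriz_vinhos
-- ===== SOURCE A (Python) =====
-- import math
--
-- def is_prime(num):
--     """Verifica se um número é primo."""
--     if num < 2:
--         return False
--     for i in range(2, int(math.sqrt(num)) + 1):
--         if num % i == 0:
--             return False
--     return True
--
-- def fibonacci_up_to(n):
--     """Gera números de Fibonacci até o valor n."""
--     fib_sequence = [0, 1]
--     while fib_sequence[-1] <= n:
--         fib_sequence.append(fib_sequence[-1] + fib_sequence[-2])
--     return fib_sequence
--
-- def matriz_vinhos(rows, cols):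
--     """Cria a matriz de vinhos."""
--     # Limite baseado no maior índice possível na matriz
--     max_value = rows + cols
--
--     # Gerar números de Fibonacci até o maior valor de i + j possível
--     fibonacci_numbers = set(fibonacci_up_to(max_value))
--
--     # Criar a matriz
--     matriz = [['' for _ in range(cols)] for _ in range(rows)]
--
--     for i in range(rows):
--         for j in range(cols):
--             soma = i + j
--             # Verificar se a soma é tanto um número de Fibonacci quanto primo
--             if soma in fibonacci_numbers and is_prime(soma):
--                 matriz[i][j] = 'Vinho'  # Coloca vinho naquela célula
--             else:
--                 matriz[i][j] = ''  # Deixa vazio ou outro valor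
--
--     return matriz
-- ===== SOURCE B (Python) =====
-- def _is_prime(num):
--     if num < 2:
--         return False
--     d = 2
--     while d * d <= num:
--         if num % d == 0:
--             return False
--         d += 1
--     return True
--
-- def _fib_up_to(limit):
--     fibs = []
--     a, b = 0, 1
--     while a <= limit:
--         fibs.append(a)
--         a, b = b, a + b
--     return fibs
--
-- def matriz_vinhos(rows, cols):
--     """Cria a matriz de vinhos: fill only the anti-diagonals whose sum is a
--     prime Fibonacci number, instead of testing every cell."""
--     matriz = [['' for _ in range(cols)] for _ in range(rows)]
--     for s in _fib_up_to(rows + cols):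
--         if _is_prime(s):
--             for i in range(max(0, s - cols + 1), min(rows - 1, s) + 1):
--                 matriz[i][s - i] = 'Vinho'
--     return matriz
-- ===== Notes on version B (the rewrite author's own statement) =====
-- stated objective: alternative
-- what changed: Instead of scanning every cell and testing its index sum against the Fibonacci set and a primality check, B generates the Fibonacci numbers up to rows+cols by a pair recurrence, keeps the prime ones, and writes 'Vinho' only along those anti-diagonals of a pre-built empty grid.
import Mathlib
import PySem

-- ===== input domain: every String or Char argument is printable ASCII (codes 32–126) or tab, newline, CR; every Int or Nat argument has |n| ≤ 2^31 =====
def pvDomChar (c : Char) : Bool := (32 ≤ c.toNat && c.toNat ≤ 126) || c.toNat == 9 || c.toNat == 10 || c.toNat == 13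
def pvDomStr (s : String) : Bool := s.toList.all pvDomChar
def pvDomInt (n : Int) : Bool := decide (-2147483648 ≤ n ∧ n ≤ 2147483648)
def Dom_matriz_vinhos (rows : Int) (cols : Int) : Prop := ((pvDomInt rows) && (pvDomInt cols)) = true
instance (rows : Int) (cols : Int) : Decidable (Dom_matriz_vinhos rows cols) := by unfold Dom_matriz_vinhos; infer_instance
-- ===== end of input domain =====

-- B fills only the anti-diagonals whose index sum is a prime Fibonacci number instead of
-- testing every cell (a different traversal of the grid; same asymptotic cost).

-- ===== PORT A =====
-- is_prime. int(math.sqrt(num)) is ported as Nat.sqrt, exact for the magnitudes reachable here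
-- (num ≤ 2^33, where truncating the float sqrt equals the integer sqrt); the for-loop with
-- early 'return False' is the structural .all over the same range.
def is_prime (num : Int) : Bool :=
  if num < 2 then false
  else (PySem.List.pyRange 2 ((Nat.sqrt num.toNat : Int) + 1) 1).all
         (fun i => !(PySem.Int.mod num i == 0))

-- the while-loop of fibonacci_up_to, with fuel n.toNat+3 (sufficient: the last element first
-- exceeds n within n.toNat+2 iterations); seq[-1]/seq[-2] use the total pyGetD form (the list
-- always has ≥ 2 elements, so it is exact)
def fibLoopA : Nat → Int → List Int → List Int
  | 0, _, seq => seq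
  | fuel+1, n, seq =>
      if PySem.List.pyGetD seq (-1) 0 ≤ n then
        fibLoopA fuel n (seq ++ [PySem.List.pyGetD seq (-1) 0 + PySem.List.pyGetD seq (-2) 0])
      else seq

def fibonacci_up_to (n : Int) : List Int := fibLoopA (n.toNat + 3) n [0, 1]

def matriz_vinhos (rows : Int) (cols : Int) : List (List String) :=
  let max_value := rows + cols
  let fibonacci_numbers : PySem.Set Int := PySem.Set.ofList (fibonacci_up_to max_value)
  let matriz : List (List String) :=
    (PySem.List.pyRange 0 rows 1).map (fun _ => (PySem.List.pyRange 0 cols 1).map (fun _ => ""))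
  (PySem.List.pyRange 0 rows 1).foldl (fun matriz i =>
    (PySem.List.pyRange 0 cols 1).foldl (fun matriz j =>
      if PySem.Set.contains fibonacci_numbers (i + j) && is_prime (i + j) then
        PySem.List.pySetD matriz i (PySem.List.pySetD (PySem.List.pyGetD matriz i []) j "Vinho")
      else
        PySem.List.pySetD matriz i (PySem.List.pySetD (PySem.List.pyGetD matriz i []) j "")
      ) matriz) matriz

-- ===== PORT B =====
-- while d*d <= num
def primeLoop (num d : Int) : Bool :=
  if h : d * d ≤ num then
    (if PySem.Int.mod num d == 0 then false else primeLoop num (d + 1))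
  else true
termination_by (num + 1 - d).toNat
decreasing_by
  have hd : d ≤ num := by nlinarith [sq_nonneg d, sq_nonneg (d - 1)]
  omega

def is_prime_alt (num : Int) : Bool := if num < 2 then false else primeLoop num 2

-- while a <= limit, with fuel limit.toNat+4 (sufficient: a first exceeds limit within
-- limit.toNat+3 iterations)
def fibLoopB : Nat → Int → Int → Int → List Int → List Int
  | 0, _, _, _, acc => acc
  | fuel+1, limit, a, b, acc =>
      if a ≤ limit then fibLoopB fuel limit b (a + b) (acc ++ [a]) else acc

def fib_up_to_alt (limit : Int) : List Int := fibLoopB (limit.toNat + 4) limit 0 1 []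

-- the anti-diagonal fill: matriz[i][s-i] = 'Vinho' for i in range(max(0,s-cols+1), min(rows-1,s)+1)
def fillDiag (rows cols : Int) (m : List (List String)) (s : Int) : List (List String) :=
  (PySem.List.pyRange (max 0 (s - cols + 1)) (min (rows - 1) s + 1) 1).foldl
    (fun m i => PySem.List.pySetD m i (PySem.List.pySetD (PySem.List.pyGetD m i []) (s - i) "Vinho")) m

def matriz_vinhos_alt (rows : Int) (cols : Int) : List (List String) :=
  let matriz : List (List String) :=
    (PySem.List.pyRange 0 rows 1).map (fun _ => (PySem.List.pyRange 0 cols 1).map (fun _ => ""))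
  (fib_up_to_alt (rows + cols)).foldl (fun m s =>
    if is_prime_alt s then fillDiag rows cols m s else m) matriz

-- ===== PRECONDITION & SPEC =====
def Spec_matriz_vinhos (rows : Int) (cols : Int) (out : List (List String)) : Prop := out = matriz_vinhos_alt rows cols
instance (rows : Int) (cols : Int) (out : List (List String)) : Decidable (Spec_matriz_vinhos rows cols out) := by unfold Spec_matriz_vinhos; infer_instance

-- ===== CLAIM (what is proved, stated in full; the proofs are below) =====
def Claim_equal_matriz_vinhos : Prop := ∀ (rows : Int) (cols : Int), Dom_matriz_vinhos rows cols → Spec_matriz_vinhos rows cols (matriz_vinhos rows cols)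

-- ===== LEMMAS AND PROOFS =====

-- the final state value of A's while loop (the one Fibonacci value A appends beyond the bound)
def finalB : Nat → Int → Int → Int → Int
  | 0, _, a, _ => a
  | fuel+1, n, a, b => if a ≤ n then finalB fuel n b (a + b) else a

theorem pv_negIdx (seq : List Int) (x y : Int) :
    PySem.List.pyGetD (seq ++ [x, y]) (-1) 0 = y ∧ PySem.List.pyGetD (seq ++ [x, y]) (-2) 0 = x := by
  constructor
  · have h : seq ++ [x, y] = (seq ++ [x]) ++ [y] := by simp
    rw [h, PySem.List.pyGetD_neg_one_append_singleton]
  · rw [PySem.List.pyGetD_neg_ofNat (seq ++ [x, y]) 2 0 (by omega) (by simp)]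
    simp

theorem pv_loop_align (n : Int) : ∀ (fuel : Nat) (seq : List Int) (x y : Int),
    fibLoopA fuel n (seq ++ [x, y]) =
      fibLoopB fuel n y (x + y) (seq ++ [x]) ++ [finalB fuel n y (x + y)] := by
  intro fuel
  induction fuel with
  | zero => intro seq x y; simp [fibLoopA, fibLoopB, finalB]
  | succ fuel ih =>
    intro seq x y
    rw [fibLoopA, fibLoopB, finalB]
    rw [(pv_negIdx seq x y).1, (pv_negIdx seq x y).2]
    by_cases h : y ≤ n
    · simp only [if_pos h]
      have e1 : seq ++ [x, y] ++ [y + x] = (seq ++ [x]) ++ [y, x + y] := by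
        simp [Int.add_comm y x]
      rw [e1, ih (seq ++ [x]) y (x + y)]
    · simp [if_neg h]

theorem pv_finalB_gt (n : Int) : ∀ (f : Nat) (a b : Int), 1 ≤ a → a ≤ b → n + 1 ≤ b + f →
    n < finalB (f + 1) n a b := by
  intro f
  induction f with
  | zero =>
    intro a b ha hab hb
    rw [finalB]
    by_cases h : a ≤ n
    · rw [if_pos h, finalB]; omega
    · rw [if_neg h]; omega
  | succ f ih =>
    intro a b ha hab hb
    rw [finalB]
    by_cases h : a ≤ n
    · rw [if_pos h]
      exact ih b (a + b) (by omega) (by omega) (by push_cast at hb ⊢; omega)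
    · rw [if_neg h]; omega

theorem pv_fib_decomp (n : Int) : ∃ rest : List Int,
    fibonacci_up_to n = fib_up_to_alt n ++ rest ∧ ∀ t ∈ rest, n < t := by
  unfold fibonacci_up_to fib_up_to_alt
  have h4 : n.toNat + 4 = (n.toNat + 3) + 1 := by omega
  by_cases hn : 0 ≤ n
  · have h0 : (0:Int) ≤ n := hn
    rw [h4, fibLoopB]
    rw [if_pos h0]
    have := pv_loop_align n (n.toNat + 3) [] 0 1
    simp only [List.nil_append] at this
    refine ⟨[finalB (n.toNat + 3) n 1 (0 + 1)], ?_, ?_⟩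
    · simpa using this
    · intro t ht
      simp at ht
      subst ht
      have : n < finalB ((n.toNat + 2) + 1) n 1 (0 + 1) :=
        pv_finalB_gt n (n.toNat + 2) 1 (0 + 1) (by omega) (by omega) (by push_cast; omega)
      simpa [show (n.toNat + 2) + 1 = n.toNat + 3 from rfl] using this
  · have : n < 0 := by omega
    rw [h4, fibLoopB, if_neg (by omega)]
    refine ⟨[0, 1], ?_, ?_⟩
    · have h3 : n.toNat + 3 = 2 + 1 := by omega
      rw [h3, fibLoopA]
      rw [if_neg (by norm_num [show PySem.List.pyGetD ([0,1] : List Int) (-1) 0 = 1 from rfl]; omega)]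
      simp
    · intro t ht; simp at ht; rcases ht with h | h <;> omega

theorem pv_primeLoop_iff (num : Int) : ∀ (d : Int), 0 ≤ d →
    (primeLoop num d = true ↔ ∀ e : Int, d ≤ e → e * e ≤ num → ¬(PySem.Int.mod num e = 0)) := by
  intro d
  fun_induction primeLoop num d with
  | case1 d h hm =>
    intro hd
    rw [beq_iff_eq] at hm
    simp only [Bool.false_eq_true, false_iff]
    push Not
    exact ⟨d, le_refl d, h, hm⟩
  | case2 d h hm ih =>
    intro hd
    rw [ih (by omega)]
    constructor
    · intro hall e he hee
      rcases eq_or_lt_of_le he with rfl | hlt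
      · simpa using hm
      · exact hall e (by omega) hee
    · intro hall e he hee
      exact hall e (by omega) hee
  | case3 d h =>
    intro hd
    simp only [true_iff]
    intro e he hee
    exfalso
    have : d * d ≤ e * e := by nlinarith
    omega

theorem pv_prime_eq (num : Int) : is_prime num = is_prime_alt num := by
  unfold is_prime is_prime_alt
  by_cases h2 : num < 2
  · rw [if_pos h2, if_pos h2]
  · rw [if_neg h2, if_neg h2]
    have hnn : (0:Int) ≤ num := by omega
    have hcast : ((num.toNat : Int)) = num := Int.toNat_of_nonneg hnn
    rw [Bool.eq_iff_iff]
    rw [pv_primeLoop_iff num 2 (by omega)]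
    rw [List.all_eq_true]
    constructor
    · intro hall e he hee
      have he0 : (0:Int) ≤ e := by omega
      have hes : e ≤ (Nat.sqrt num.toNat : Int) := by
        have hce : ((e.toNat : Int)) = e := Int.toNat_of_nonneg he0
        have : e.toNat * e.toNat ≤ num.toNat := by
          have : ((e.toNat * e.toNat : Nat) : Int) ≤ ((num.toNat : Nat) : Int) := by push_cast; rw [hce, hcast]; exact hee
          exact_mod_cast this
        have := (Nat.le_sqrt).mpr this
        omega
      have hmem : e ∈ PySem.List.pyRange 2 ((Nat.sqrt num.toNat : Int) + 1) 1 := by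
        rw [PySem.List.mem_pyRange_one]; omega
      have := hall e hmem
      simpa using this
    · intro hall i hi
      rw [PySem.List.mem_pyRange_one] at hi
      have hi0 : (0:Int) ≤ i := by omega
      have hii : i * i ≤ num := by
        have hci : ((i.toNat : Int)) = i := Int.toNat_of_nonneg hi0
        have hle : i.toNat ≤ Nat.sqrt num.toNat := by omega
        have h : i.toNat * i.toNat ≤ num.toNat := Nat.le_sqrt.mp hle
        have : ((i.toNat * i.toNat : Nat) : Int) ≤ ((num.toNat : Nat) : Int) := by exact_mod_cast h
        push_cast at this
        rw [hci, hcast] at this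
        exact this
      have := hall i (by omega) hii
      simpa using this

theorem pv_rowFold {α : Type} (F : Nat → α → α) (d : α) :
    ∀ (n : Nat) (xs : List α), n ≤ xs.length →
    (List.range n).foldl (fun ys k => ys.set k (F k (ys.getD k d))) xs
      = (List.range n).map (fun k => F k (xs.getD k d)) ++ xs.drop n := by
  intro n
  induction n with
  | zero => intro xs h; simp
  | succ n ih =>
    intro xs h
    rw [List.range_succ, List.foldl_append, List.map_append]
    rw [ih xs (by omega)]
    simp only [List.foldl_cons, List.foldl_nil, List.map_cons, List.map_nil]
    have hlen : ((List.range n).map (fun k => F k (xs.getD k d))).length = n := by simp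
    have hd := List.drop_eq_getElem_cons (l := xs) (i := n) (h := by omega)
    rw [hd, List.set_append, if_neg (by omega), hlen]
    simp only [Nat.sub_self, List.set_cons_zero]
    rw [List.append_assoc, List.singleton_append]
    congr 2
    rw [List.getD_eq_getElem?_getD, List.getElem?_append_right (by omega), hlen]
    simp [List.getD_eq_getElem?_getD, List.getElem?_eq_getElem (show n < xs.length by omega)]

theorem pv_innerToRow {α β : Type} (G : α → β → α) (d : α) (k : Nat) :
    ∀ (js : List β) (m : List α),
    js.foldl (fun m j => m.set k (G (m.getD k d) j)) m = m.set k (js.foldl G (m.getD k d)) := by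
  intro js
  induction js with
  | nil =>
    intro m
    simp only [List.foldl_nil]
    by_cases hk : k < m.length
    · rw [List.getD_eq_getElem?_getD, List.getElem?_eq_getElem hk]
      exact (List.set_getElem_self hk).symm
    · exact (List.set_eq_of_length_le (by omega)).symm
  | cons j js ih =>
    intro m
    simp only [List.foldl_cons]
    rw [ih]
    by_cases hk : k < m.length
    · have h1 : (m.set k (G (m.getD k d) j)).getD k d = G (m.getD k d) j := by
        rw [List.getD_eq_getElem?_getD, List.getElem?_set_self (by simpa using hk)]
        rfl
      rw [h1, List.set_set]
    · rw [List.set_eq_of_length_le (by simp; omega), List.set_eq_of_length_le (by omega),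
         List.set_eq_of_length_le (by omega)]

theorem pv_setFold {α : Type} (v : Nat → α) (d : α) :
    ∀ (n : Nat) (xs : List α), n ≤ xs.length →
    (List.range n).foldl (fun ys k => ys.set k (v k)) xs = (List.range n).map v ++ xs.drop n := by
  intro n xs h
  have := pv_rowFold (fun k _ => v k) d n xs h
  simpa using this

theorem pv_range_cast (n : Int) :
    PySem.List.pyRange 0 n 1 = (List.range n.toNat).map (fun (k : Nat) => (k : Int)) := by
  rw [PySem.List.pyRange_one]
  simp only [sub_zero, zero_add]

theorem pv_scan_norm (rows cols : Int) (P : Int → Bool) :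
    (PySem.List.pyRange 0 rows 1).foldl (fun matriz i =>
      (PySem.List.pyRange 0 cols 1).foldl (fun matriz j =>
        if P (i + j) then
          PySem.List.pySetD matriz i (PySem.List.pySetD (PySem.List.pyGetD matriz i []) j "Vinho")
        else
          PySem.List.pySetD matriz i (PySem.List.pySetD (PySem.List.pyGetD matriz i []) j ""))
        matriz)
      ((PySem.List.pyRange 0 rows 1).map (fun _ => (PySem.List.pyRange 0 cols 1).map (fun _ => "")))
    = (List.range rows.toNat).map (fun (i : Nat) => (List.range cols.toNat).map (fun (j : Nat) =>
        if P ((i : Int) + (j : Int)) then "Vinho" else "")) := by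
  rw [pv_range_cast rows, pv_range_cast cols]
  rw [List.foldl_map]
  set row0 : List String := List.map (fun x => "") (List.map (fun (k : Nat) => (k : Int)) (List.range cols.toNat)) with hrow0
  set m0 : List (List String) := List.map (fun x => row0) (List.map (fun (k : Nat) => (k : Int)) (List.range rows.toNat)) with hm0
  have hrow0len : row0.length = cols.toNat := by simp [hrow0]
  have hm0len : m0.length = rows.toNat := by simp [hm0]
  have hInner : ∀ (acc : List (List String)) (k : Nat),
      List.foldl (fun (matriz : List (List String)) (j : Int) =>
        if P ((k : Int) + j) = true then
          PySem.List.pySetD matriz (k : Int) (PySem.List.pySetD (PySem.List.pyGetD matriz (k : Int) []) j "Vinho")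
        else PySem.List.pySetD matriz (k : Int) (PySem.List.pySetD (PySem.List.pyGetD matriz (k : Int) []) j ""))
        acc (List.map (fun (k : Nat) => (k : Int)) (List.range cols.toNat))
      = acc.set k ((List.range cols.toNat).foldl
          (fun row j => row.set j (if P ((k : Int) + (j : Int)) then "Vinho" else "")) (acc.getD k [])) := by
    intro acc k
    rw [List.foldl_map]
    have hstep : ∀ (m : List (List String)) (j : Nat),
        (if P ((k : Int) + (j : Int)) = true then
          PySem.List.pySetD m (k : Int) (PySem.List.pySetD (PySem.List.pyGetD m (k : Int) []) (j : Int) "Vinho")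
        else PySem.List.pySetD m (k : Int) (PySem.List.pySetD (PySem.List.pyGetD m (k : Int) []) (j : Int) ""))
        = m.set k ((m.getD k []).set j (if P ((k : Int) + (j : Int)) then "Vinho" else "")) := by
      intro m j
      by_cases hc : P ((k : Int) + (j : Int)) = true
      · rw [if_pos hc, if_pos hc]; simp
      · rw [if_neg hc, if_neg hc]; simp
    refine Eq.trans (PySem.List.foldl_congr_mem _ _ (fun (m : List (List String)) (j : Nat) =>
          m.set k ((m.getD k []).set j (if P ((k : Int) + (j : Int)) then "Vinho" else ""))) _
        (fun acc x _ => hstep acc x)) ?_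
    exact pv_innerToRow (fun (row : List String) (j : Nat) =>
      row.set j (if P ((k : Int) + (j : Int)) then "Vinho" else "")) [] k (List.range cols.toNat) acc
  refine Eq.trans (PySem.List.foldl_congr_mem _ _ (fun (m : List (List String)) (k : Nat) =>
        m.set k ((List.range cols.toNat).foldl
          (fun row j => row.set j (if P ((k : Int) + (j : Int)) then "Vinho" else "")) (m.getD k []))) _
      (fun acc x _ => hInner acc x)) ?_
  refine Eq.trans (pv_rowFold (fun (k : Nat) (row : List String) => (List.range cols.toNat).foldl
        (fun row j => row.set j (if P ((k : Int) + (j : Int)) then "Vinho" else "")) row)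
      [] rows.toNat m0 (le_of_eq hm0len.symm)) ?_
  rw [List.drop_of_length_le (le_of_eq hm0len), List.append_nil]
  apply List.map_congr_left
  intro k hk
  rw [List.mem_range] at hk
  have hgetm0 : m0.getD k [] = row0 := by
    rw [hm0, List.getD_eq_getElem?_getD]
    simp [List.getElem?_map, List.getElem?_range hk]
  rw [hgetm0]
  have hsf := pv_setFold (fun (j : Nat) => if P ((k : Int) + (j : Int)) then "Vinho" else "") ""
      cols.toNat row0 (le_of_eq hrow0len.symm)
  rw [List.drop_of_length_le (le_of_eq hrow0len), List.append_nil] at hsf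
  exact hsf


def pvCell (m : List (List String)) (i j : Nat) : String := (m.getD i []).getD j ""

def pvDims (r c : Nat) (m : List (List String)) : Prop :=
  m.length = r ∧ ∀ row ∈ m, row.length = c

theorem pv_getD_set {α : Type} (m : List α) (d : α) (a : Nat) (x : α) (i : Nat) :
    (m.set a x).getD i d = if i = a ∧ a < m.length then x else m.getD i d := by
  by_cases h1 : i = a
  · subst h1
    by_cases h2 : i < m.length
    · rw [if_pos ⟨rfl, h2⟩, List.getD_eq_getElem?_getD, List.getElem?_set_self (by simpa using h2)]
      rfl
    · rw [List.set_eq_of_length_le (by omega), if_neg (by omega)]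
  · rw [if_neg (by omega), List.getD_eq_getElem?_getD, List.getElem?_set_ne (by omega),
      ← List.getD_eq_getElem?_getD]

theorem pv_write_cell (m : List (List String)) (iv jv : Int) (hiv : 0 ≤ iv) (hjv : 0 ≤ jv)
    (i j : Nat) :
    pvCell (PySem.List.pySetD m iv (PySem.List.pySetD (PySem.List.pyGetD m iv []) jv "Vinho")) i j
      = if (i : Int) = iv ∧ (j : Int) = jv ∧ i < m.length ∧ j < (m.getD i []).length
        then "Vinho" else pvCell m i j := by
  obtain ⟨a, rfl⟩ : ∃ a : Nat, iv = (a : Int) := ⟨iv.toNat, (Int.toNat_of_nonneg hiv).symm⟩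
  obtain ⟨b, rfl⟩ : ∃ b : Nat, jv = (b : Int) := ⟨jv.toNat, (Int.toNat_of_nonneg hjv).symm⟩
  rw [PySem.List.pySetD_natCast, PySem.List.pySetD_natCast, PySem.List.pyGetD_natCast]
  unfold pvCell
  rw [pv_getD_set]
  by_cases h1 : i = a ∧ a < m.length
  · obtain ⟨rfl, hlen⟩ := h1
    rw [if_pos ⟨rfl, hlen⟩, pv_getD_set]
    by_cases h2 : j = b ∧ b < (m.getD i []).length
    · obtain ⟨rfl, hbl⟩ := h2
      rw [if_pos ⟨rfl, hbl⟩, if_pos ⟨rfl, rfl, hlen, hbl⟩]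
    · have hbig : ¬((i : Int) = (i : Int) ∧ (j : Int) = (b : Int) ∧ i < m.length ∧ j < (m.getD i []).length) := by
        push Not at h2 ⊢
        intro _ hj _
        have hjb : j = b := by exact_mod_cast hj
        subst hjb
        exact h2 rfl
      rw [if_neg h2, if_neg hbig]
  · have hbig : ¬((i : Int) = (a : Int) ∧ (j : Int) = (b : Int) ∧ i < m.length ∧ j < (m.getD i []).length) := by
      push Not at h1 ⊢
      intro hi _ hl
      have hia : i = a := by exact_mod_cast hi
      subst hia
      exact absurd hl (by have := h1 rfl; omega)
    rw [if_neg h1, if_neg hbig]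

theorem pv_write_dims (r c : Nat) (m : List (List String)) (iv jv : Int) (hiv : 0 ≤ iv) (hjv : 0 ≤ jv)
    (h : pvDims r c m) :
    pvDims r c (PySem.List.pySetD m iv (PySem.List.pySetD (PySem.List.pyGetD m iv []) jv "Vinho")) := by
  obtain ⟨a, rfl⟩ : ∃ a : Nat, iv = (a : Int) := ⟨iv.toNat, (Int.toNat_of_nonneg hiv).symm⟩
  obtain ⟨b, rfl⟩ : ∃ b : Nat, jv = (b : Int) := ⟨jv.toNat, (Int.toNat_of_nonneg hjv).symm⟩
  rw [PySem.List.pySetD_natCast, PySem.List.pySetD_natCast, PySem.List.pyGetD_natCast]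
  obtain ⟨hl, hrows⟩ := h
  by_cases ha : a < m.length
  · constructor
    · simpa using hl
    · intro row hrow
      rcases List.mem_or_eq_of_mem_set hrow with hmem | heq
      · exact hrows row hmem
      · subst heq
        rw [List.length_set]
        exact hrows _ (by rw [List.getD_eq_getElem?_getD, List.getElem?_eq_getElem ha]; exact List.getElem_mem ha)
  · rw [List.set_eq_of_length_le (by omega)]
    exact ⟨hl, hrows⟩

theorem pv_fillDiag_dims (rows cols : Int) (r c : Nat) (s : Int) :
    ∀ (m : List (List String)), pvDims r c m → pvDims r c (fillDiag rows cols m s) := by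
  unfold fillDiag
  generalize hL : PySem.List.pyRange (max 0 (s - cols + 1)) (min (rows - 1) s + 1) 1 = L
  have hpos : ∀ iv ∈ L, 0 ≤ iv ∧ iv ≤ s := by
    intro iv hiv
    rw [← hL, PySem.List.mem_pyRange_one] at hiv
    omega
  clear hL
  induction L with
  | nil => intro m h; simpa using h
  | cons w L ih =>
    intro m h
    simp only [List.foldl_cons]
    have hw := hpos w (by simp)
    exact ih (fun iv hiv => hpos iv (by simp [hiv])) _
      (pv_write_dims r c m w (s - w) (by omega) (by omega) h)

theorem pv_write_pres (m : List (List String)) (iv jv : Int) (hiv : 0 ≤ iv) (hjv : 0 ≤ jv) :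
    (PySem.List.pySetD m iv (PySem.List.pySetD (PySem.List.pyGetD m iv []) jv "Vinho")).length = m.length
    ∧ ∀ k : Nat, ((PySem.List.pySetD m iv (PySem.List.pySetD (PySem.List.pyGetD m iv []) jv "Vinho")).getD k []).length
        = (m.getD k []).length := by
  obtain ⟨a, rfl⟩ : ∃ a : Nat, iv = (a : Int) := ⟨iv.toNat, (Int.toNat_of_nonneg hiv).symm⟩
  obtain ⟨b, rfl⟩ : ∃ b : Nat, jv = (b : Int) := ⟨jv.toNat, (Int.toNat_of_nonneg hjv).symm⟩
  rw [PySem.List.pySetD_natCast, PySem.List.pySetD_natCast, PySem.List.pyGetD_natCast]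
  constructor
  · simp
  · intro k
    rw [pv_getD_set]
    by_cases hk : k = a ∧ a < m.length
    · rw [if_pos hk, List.length_set, hk.1]
    · rw [if_neg hk]

theorem pv_writes_cell (s : Int) : ∀ (ws : List Int) (m : List (List String)),
    (∀ w ∈ ws, 0 ≤ w ∧ w ≤ s) →
    ∀ (i j : Nat),
    pvCell (ws.foldl (fun m iv => PySem.List.pySetD m iv
        (PySem.List.pySetD (PySem.List.pyGetD m iv []) (s - iv) "Vinho")) m) i j
      = if (i : Int) ∈ ws ∧ (j : Int) = s - (i : Int) ∧ i < m.length ∧ j < (m.getD i []).length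
        then "Vinho" else pvCell m i j := by
  intro ws
  induction ws with
  | nil => intro m _ i j; simp
  | cons w ws ih =>
    intro m hws i j
    simp only [List.foldl_cons]
    have hw := hws w (by simp)
    have hpres := pv_write_pres m w (s - w) (by omega) (by omega)
    rw [ih _ (fun v hv => hws v (by simp [hv])) i j, hpres.1, hpres.2 i,
      pv_write_cell m w (s - w) (by omega) (by omega) i j]
    simp only [List.mem_cons]
    by_cases hA : (i : Int) ∈ ws ∧ (j : Int) = s - (i : Int) ∧ i < m.length ∧ j < (m.getD i []).length
    · rw [if_pos hA, if_pos ⟨Or.inr hA.1, hA.2⟩]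
    · rw [if_neg hA]
      by_cases hC : (i : Int) = w ∧ (j : Int) = s - w ∧ i < m.length ∧ j < (m.getD i []).length
      · rw [if_pos hC, if_pos ⟨Or.inl hC.1, by rw [hC.1]; exact hC.2⟩]
      · rw [if_neg hC, if_neg (by
          intro ⟨hor, hj, hb1, hb2⟩
          rcases hor with he | hm
          · exact hC ⟨he, by rw [← he]; exact hj, hb1, hb2⟩
          · exact hA ⟨hm, hj, hb1, hb2⟩)]

theorem pv_fillDiag_cell (rows cols : Int) (r c : Nat) (hr : rows = (r : Int)) (hc : cols = (c : Int))
    (m : List (List String)) (s : Int) (hm : pvDims r c m) (i j : Nat) (hi : i < r) (hj : j < c) :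
    pvCell (fillDiag rows cols m s) i j = if (i : Int) + j = s then "Vinho" else pvCell m i j := by
  unfold fillDiag
  obtain ⟨hl, hrows⟩ := hm
  have hrowlen : (m.getD i []).length = c := by
    have hilen : i < m.length := by omega
    rw [List.getD_eq_getElem?_getD, List.getElem?_eq_getElem hilen]
    exact hrows _ (List.getElem_mem hilen)
  rw [pv_writes_cell s _ m
      (by intro w hw; rw [PySem.List.mem_pyRange_one] at hw; omega) i j]
  have hmem : ((i : Int) ∈ PySem.List.pyRange (max 0 (s - cols + 1)) (min (rows - 1) s + 1) 1)
      ↔ (max 0 (s - cols + 1) ≤ (i : Int) ∧ (i : Int) < min (rows - 1) s + 1) := PySem.List.mem_pyRange_one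
  by_cases hsum : (i : Int) + j = s
  · rw [if_pos hsum, if_pos ⟨hmem.mpr (by omega), by omega, by omega, by omega⟩]
  · rw [if_neg hsum, if_neg (by
      rintro ⟨hin, hjeq, _, _⟩
      exact hsum (by omega))]

theorem pv_fillFold_cell (rows cols : Int) (r c : Nat) (hr : rows = (r : Int)) (hc : cols = (c : Int)) :
    ∀ (L : List Int) (m : List (List String)), pvDims r c m →
    ∀ (i j : Nat), i < r → j < c →
    pvCell (L.foldl (fillDiag rows cols) m) i j
      = if ((i : Int) + j) ∈ L then "Vinho" else pvCell m i j := by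
  intro L
  induction L with
  | nil => intro m _ i j _ _; simp
  | cons s L ih =>
    intro m hm i j hi hj
    simp only [List.foldl_cons, List.mem_cons]
    rw [ih _ (pv_fillDiag_dims rows cols r c s m hm) i j hi hj,
      pv_fillDiag_cell rows cols r c hr hc m s hm i j hi hj]
    by_cases h1 : ((i : Int) + j) ∈ L
    · rw [if_pos h1, if_pos (Or.inr h1)]
    · rw [if_neg h1]
      by_cases h2 : (i : Int) + j = s
      · rw [if_pos h2, if_pos (Or.inl h2)]
      · rw [if_neg h2, if_neg (by rintro (h | h); exact h2 h; exact h1 h)]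

theorem pv_fillFold_dims (rows cols : Int) (r c : Nat) :
    ∀ (L : List Int) (m : List (List String)), pvDims r c m →
    pvDims r c (L.foldl (fillDiag rows cols) m) := by
  intro L
  induction L with
  | nil => intro m h; simpa using h
  | cons s L ih =>
    intro m h
    exact ih _ (pv_fillDiag_dims rows cols r c s m h)

theorem pv_grid_of_cell (r c : Nat) (m : List (List String)) (hm : pvDims r c m)
    (f : Nat → Nat → String) (hcell : ∀ i j, i < r → j < c → pvCell m i j = f i j) :
    m = (List.range r).map (fun i => (List.range c).map (fun j => f i j)) := by
  obtain ⟨hl, hrows⟩ := hm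
  apply List.ext_getElem (by simpa using hl)
  intro i h1 h2
  rw [List.getElem_map, List.getElem_range]
  have hir : i < r := by simpa using h2
  have hrowlen : m[i].length = c := hrows _ (List.getElem_mem h1)
  apply List.ext_getElem (by simpa using hrowlen)
  intro j hj1 hj2
  rw [List.getElem_map, List.getElem_range]
  have hjc : j < c := by simpa using hj2
  have := hcell i j hir hjc
  unfold pvCell at this
  rw [List.getD_eq_getElem?_getD (l := m), List.getElem?_eq_getElem h1] at this
  simp only [Option.getD_some] at this
  rw [List.getD_eq_getElem?_getD, List.getElem?_eq_getElem hj1] at this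
  simpa using this

theorem pv_m0_dims (rows cols : Int) :
    pvDims rows.toNat cols.toNat
      ((PySem.List.pyRange 0 rows 1).map (fun _ => (PySem.List.pyRange 0 cols 1).map (fun _ => ""))) := by
  constructor
  · rw [pv_range_cast]; simp
  · intro row hrow
    rw [List.mem_map] at hrow
    obtain ⟨_, _, rfl⟩ := hrow
    rw [pv_range_cast]; simp

theorem pv_m0_cell (rows cols : Int) (i j : Nat) (hi : i < rows.toNat) :
    pvCell ((PySem.List.pyRange 0 rows 1).map (fun _ => (PySem.List.pyRange 0 cols 1).map (fun _ => ""))) i j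
      = "" := by
  unfold pvCell
  have hlen : i < (PySem.List.pyRange 0 rows 1).length := by
    rw [pv_range_cast]; simpa using hi
  rw [List.getD_eq_getElem?_getD (l := List.map _ _), List.getElem?_map,
    List.getElem?_eq_getElem hlen]
  simp only [Option.map_some, Option.getD_some]
  rw [List.getD_eq_getElem?_getD, List.getElem?_map]
  cases (PySem.List.pyRange 0 cols 1)[j]? <;> rfl

theorem pv_B_norm (rows cols : Int) :
    matriz_vinhos_alt rows cols =
      (List.range rows.toNat).map (fun (i : Nat) => (List.range cols.toNat).map (fun (j : Nat) =>
        if ((i : Int) + (j : Int)) ∈ (fib_up_to_alt (rows + cols)).filter is_prime_alt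
        then "Vinho" else "")) := by
  unfold matriz_vinhos_alt
  rw [PySem.List.foldl_if_eq_foldl_filter]
  apply pv_grid_of_cell
  · exact pv_fillFold_dims rows cols _ _ _ _ (pv_m0_dims rows cols)
  · intro i j hi hj
    have hr : rows = (rows.toNat : Int) := by omega
    have hc : cols = (cols.toNat : Int) := by omega
    rw [pv_fillFold_cell rows cols rows.toNat cols.toNat hr hc _ _ (pv_m0_dims rows cols) i j hi hj]
    rw [pv_m0_cell rows cols i j hi]

theorem pv_A_norm (rows cols : Int) :
    matriz_vinhos rows cols =
      (List.range rows.toNat).map (fun (i : Nat) => (List.range cols.toNat).map (fun (j : Nat) =>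
        if PySem.Set.contains (PySem.Set.ofList (fibonacci_up_to (rows + cols))) ((i : Int) + (j : Int))
            && is_prime ((i : Int) + (j : Int)) then "Vinho" else "")) :=
  pv_scan_norm rows cols
    (fun s => PySem.Set.contains (PySem.Set.ofList (fibonacci_up_to (rows + cols))) s && is_prime s)

theorem pv_pred_iff (rows cols : Int) (s : Int) (h2 : s ≤ rows + cols - 2) :
    (PySem.Set.contains (PySem.Set.ofList (fibonacci_up_to (rows + cols))) s && is_prime s) = true
      ↔ s ∈ (fib_up_to_alt (rows + cols)).filter is_prime_alt := by
  obtain ⟨rest, hdecomp, hgt⟩ := pv_fib_decomp (rows + cols)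
  rw [Bool.and_eq_true, PySem.Set.contains_iff, PySem.Set.mem_ofList, hdecomp, List.mem_append,
    List.mem_filter, pv_prime_eq]
  constructor
  · rintro ⟨hf | hf, hp⟩
    · exact ⟨hf, hp⟩
    · exact absurd (hgt s hf) (by omega)
  · rintro ⟨hf, hp⟩
    exact ⟨Or.inl hf, hp⟩

-- ===== VERDICT (by name: the statement is the Claim_ definition above) =====
theorem matriz_vinhos_spec : Claim_equal_matriz_vinhos := by
  intro rows cols _
  unfold Spec_matriz_vinhos
  rw [pv_A_norm, pv_B_norm]
  apply List.map_congr_left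
  intro i hi
  apply List.map_congr_left
  intro j hj
  rw [List.mem_range] at hi hj
  have hr : rows = (rows.toNat : Int) := by omega
  have hc : cols = (cols.toNat : Int) := by omega
  have hb : (i : Int) + (j : Int) ≤ rows + cols - 2 := by omega
  by_cases hmem : ((i : Int) + (j : Int)) ∈ (fib_up_to_alt (rows + cols)).filter is_prime_alt
  · rw [if_pos hmem, if_pos ((pv_pred_iff rows cols _ hb).mpr hmem)]
  · rw [if_neg hmem, if_neg (fun h => hmem ((pv_pred_iff rows cols _ hb).mp h))]
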